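-- pv_equiv track=rewrite | github.com/kimjune01/june.kim | worklog/fireworks_v3.py | verify_temporal_spanner
-- ===== SOURCE A (Python) =====
-- from collections import defaultdict
--
-- def ekey(u, v):
--     return (min(u, v), max(u, v))
--
-- def verify_temporal_spanner(n, timestamps, spanner_edges):
--     """Check temporal reachability for all pairs."""
--     if n > 16:
--         return None
--
--     adj = defaultdict(list)
--     for (u, v) in spanner_edges:
--         t = timestamps[ekey(u, v)]
--         adj[u].append((v, t))
--         adj[v].append((u, t))
--
--     for source in range(n):
--         reachable = {source}
--         frontier = [(source, -1)]
--         visited = {(source, -1)}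
--
--         while frontier:
--             next_f = []
--             for v, last_t in frontier:
--                 for w, t in adj[v]:
--                     if t > last_t and (w, t) not in visited:
--                         visited.add((w, t))
--                         reachable.add(w)
--                         next_f.append((w, t))
--             frontier = next_f
--
--         if len(reachable) < n:
--             return False
--     return True
-- ===== SOURCE B (Python) =====
-- def ekey(u, v):
--     return (min(u, v), max(u, v))
--
-- def verify_temporal_spanner(n, timestamps, spanner_edges):
--     """Check temporal reachability for all pairs by an ascending time-sweep."""
--     if n > 16:
--         return None
--
--     edges = []
--     for (u, v) in spanner_edges:
--         t = timestamps[ekey(u, v)]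
--         if t > -1:
--             edges.append((t, u, v))
--     times = sorted({t for (t, _, _) in edges})
--
--     for source in range(n):
--         reach = {source}
--         for tm in times:
--             snap = reach.copy()
--             for (t, u, v) in edges:
--                 if t == tm:
--                     if u in snap:
--                         reach.add(v)
--                     if v in snap:
--                         reach.add(u)
--         if len(reach) < n:
--             return False
--     return True
-- ===== Notes on version B (the rewrite author's own statement) =====
-- stated objective: alternative
-- what changed: Replaces the per-source BFS over (node, last_time) states with a single chronological sweep: usable edges are listed once with their times, the distinct timestamps are sorted ascending, and per source a reach set is grown time-batch by time-batch against a snapshot, which reproduces the strictly-increasing-time chaining (equal times cannot chain) without any frontier/visited machinery.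
import Mathlib
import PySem

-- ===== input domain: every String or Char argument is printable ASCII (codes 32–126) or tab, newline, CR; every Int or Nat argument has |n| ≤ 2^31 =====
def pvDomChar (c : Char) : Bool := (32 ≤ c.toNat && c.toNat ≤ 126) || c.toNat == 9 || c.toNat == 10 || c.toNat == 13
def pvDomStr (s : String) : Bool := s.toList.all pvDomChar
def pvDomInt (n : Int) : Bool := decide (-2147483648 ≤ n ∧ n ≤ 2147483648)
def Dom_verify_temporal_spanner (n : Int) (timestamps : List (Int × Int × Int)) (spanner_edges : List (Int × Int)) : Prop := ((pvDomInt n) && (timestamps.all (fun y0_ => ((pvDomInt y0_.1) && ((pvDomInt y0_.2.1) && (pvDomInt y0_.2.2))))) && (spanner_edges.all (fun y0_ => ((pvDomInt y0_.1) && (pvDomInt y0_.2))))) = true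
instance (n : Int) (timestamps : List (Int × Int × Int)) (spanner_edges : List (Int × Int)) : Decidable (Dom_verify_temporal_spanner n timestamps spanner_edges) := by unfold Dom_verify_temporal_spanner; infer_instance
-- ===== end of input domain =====

-- B replaces A's per-source BFS over (node, last_time) states by a chronological sweep over the
-- sorted distinct edge timestamps (objective: alternative algorithm, same exact return value).

-- ===== PORT A =====
-- ekey(u, v)
def pvEkey (u v : Int) : Int × Int := (min u v, max u v)

-- timestamps[k]: first-match association-list lookup (the dict); none = KeyError (excluded by Pre_)
def pvTsGet? (ts : List (Int × Int × Int)) (k : Int × Int) : Option Int :=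
  match ts with
  | [] => none
  | y :: rest => if y.1 = k.1 ∧ y.2.1 = k.2 then some y.2.2 else pvTsGet? rest k

-- adj = defaultdict(list); for (u,v) in spanner_edges: t = timestamps[ekey(u,v)]; adj[u].append((v,t)); adj[v].append((u,t))
-- (the `.getD 0` stands for the KeyError Pre_ excludes)
def pvAdj (ts : List (Int × Int × Int)) (es : List (Int × Int)) : PySem.Dict Int (List (Int × Int)) :=
  es.foldl (fun d e =>
    let t := (pvTsGet? ts (pvEkey e.1 e.2)).getD 0
    (d.modify e.1 [] (fun l => l ++ [(e.2, t)])).modify e.2 [] (fun l => l ++ [(e.1, t)]))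
    PySem.Dict.empty

-- inner `for w, t in adj[v]` body of A's BFS, for one frontier element p; state = (next_f, visited, reachable)
def pvInner (adj : PySem.Dict Int (List (Int × Int))) (p : Int × Int)
    (st : List (Int × Int) × PySem.Set (Int × Int) × PySem.Set Int) :
    List (Int × Int) × PySem.Set (Int × Int) × PySem.Set Int :=
  (adj.getD p.1 []).foldl (fun st q =>
    if p.2 < q.2 ∧ q ∉ st.2.1 then
      (st.1 ++ [q], PySem.Set.add st.2.1 q, PySem.Set.add st.2.2 q.1)
    else st) st

-- `while frontier:` — fuel-bounded (fuel 2*len(spanner_edges)+3 is proved sufficient below)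
def pvBfs (adj : PySem.Dict Int (List (Int × Int))) :
    Nat → List (Int × Int) → PySem.Set (Int × Int) → PySem.Set Int → PySem.Set Int
  | 0, _, _, reach => reach
  | fuel+1, frontier, visited, reach =>
    if frontier = [] then reach
    else
      let st := frontier.foldl (fun st p => pvInner adj p st) (([] : List (Int × Int)), visited, reach)
      pvBfs adj fuel st.1 st.2.1 st.2.2

-- `for source in range(n): … if len(reachable) < n: return False` / `return True`
def pvCheck (adj : PySem.Dict Int (List (Int × Int))) (n : Int) (fuel : Nat) :
    List Int → Option Bool
  | [] => some true
  | s :: rest =>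
    let reach := pvBfs adj fuel [(s, -1)] [(s, -1)] [s]
    if (reach.length : Int) < n then some false else pvCheck adj n fuel rest

def verify_temporal_spanner (n : Int) (timestamps : List (Int × Int × Int)) (spanner_edges : List (Int × Int)) : Option Bool :=
  if n > 16 then none
  else pvCheck (pvAdj timestamps spanner_edges) n (2 * spanner_edges.length + 3)
         (PySem.List.pyRange 0 n 1)

-- ===== PORT B =====
-- edges = [(t,u,v) for usable edges with t > -1]  (`.getD 0` again stands for the KeyError Pre_ excludes)
def pvEdges (ts : List (Int × Int × Int)) (es : List (Int × Int)) : List (Int × Int × Int) :=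
  es.foldl (fun acc e =>
    let t := (pvTsGet? ts (pvEkey e.1 e.2)).getD 0
    if t > -1 then acc ++ [(t, e.1, e.2)] else acc) []

-- times = sorted({t for (t,_,_) in edges})
def pvTimes (ts : List (Int × Int × Int)) (es : List (Int × Int)) : List Int :=
  PySem.List.sorted (PySem.Set.ofList ((pvEdges ts es).map (·.1))) (fun x => x) false

-- per-source sweep: reach = {source}; for tm in times: snap = reach.copy(); for (t,u,v) in edges: …
def pvSweepOne (edges : List (Int × Int × Int)) (times : List Int) (s : Int) : PySem.Set Int :=
  times.foldl (fun reach tm =>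
    let snap := reach
    edges.foldl (fun r e =>
      if e.1 = tm then
        let r1 := if e.2.1 ∈ snap then PySem.Set.add r e.2.2 else r
        if e.2.2 ∈ snap then PySem.Set.add r1 e.2.1 else r1
      else r) reach) [s]

def pvSweepAll (edges : List (Int × Int × Int)) (times : List Int) (n : Int) :
    List Int → Option Bool
  | [] => some true
  | s :: rest =>
    if ((pvSweepOne edges times s).length : Int) < n then some false
    else pvSweepAll edges times n rest

def verify_temporal_spanner_alt (n : Int) (timestamps : List (Int × Int × Int)) (spanner_edges : List (Int × Int)) : Option Bool :=
  if n > 16 then none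
  else
    pvSweepAll (pvEdges timestamps spanner_edges) (pvTimes timestamps spanner_edges)
      n (PySem.List.pyRange 0 n 1)

-- ===== PRECONDITION & SPEC =====
-- Pre_ excludes exactly the inputs where the Python raises KeyError: n ≤ 16 and some spanner edge
-- whose ekey is missing from timestamps (when n > 16 both return None before any lookup).
def Pre_verify_temporal_spanner (n : Int) (timestamps : List (Int × Int × Int)) (spanner_edges : List (Int × Int)) : Prop :=
  16 < n ∨ ∀ e ∈ spanner_edges, ∃ y ∈ timestamps, y.1 = min e.1 e.2 ∧ y.2.1 = max e.1 e.2
instance (n : Int) (timestamps : List (Int × Int × Int)) (spanner_edges : List (Int × Int)) : Decidable (Pre_verify_temporal_spanner n timestamps spanner_edges) := by unfold Pre_verify_temporal_spanner; infer_instance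

def pvWitness_verify_temporal_spanner : Int × (List (Int × Int × Int)) × (List (Int × Int)) :=
  (2, [(0, 1, 5)], [(0, 1)])

def Spec_verify_temporal_spanner (n : Int) (timestamps : List (Int × Int × Int)) (spanner_edges : List (Int × Int)) (out : Option Bool) : Prop := out = verify_temporal_spanner_alt n timestamps spanner_edges
instance (n : Int) (timestamps : List (Int × Int × Int)) (spanner_edges : List (Int × Int)) (out : Option Bool) : Decidable (Spec_verify_temporal_spanner n timestamps spanner_edges out) := by unfold Spec_verify_temporal_spanner; infer_instance

-- ===== CLAIM (what is proved, stated in full; the proofs are below) =====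
def Claim_equal_verify_temporal_spanner : Prop := ∀ (n : Int) (timestamps : List (Int × Int × Int)) (spanner_edges : List (Int × Int)), Dom_verify_temporal_spanner n timestamps spanner_edges → Pre_verify_temporal_spanner n timestamps spanner_edges → Spec_verify_temporal_spanner n timestamps spanner_edges (verify_temporal_spanner n timestamps spanner_edges)

-- ===== LEMMAS AND PROOFS =====

-- the edge time both programs look up
def pvT (ts : List (Int × Int × Int)) (e : Int × Int) : Int :=
  (pvTsGet? ts (pvEkey e.1 e.2)).getD 0

def pvAdjL (adj : PySem.Dict Int (List (Int × Int))) : Int → List (Int × Int) :=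
  fun v => adj.getD v []

lemma pvAdjL_apply (adj : PySem.Dict Int (List (Int × Int))) (v : Int) :
    pvAdjL adj v = adj.getD v [] := rfl

-- the common specification: states (node, last_time) reachable by a strictly-increasing-time walk
inductive pvReach (adjL : Int → List (Int × Int)) (s : Int) : Int × Int → Prop
  | base : pvReach adjL s (s, -1)
  | step {p q} : pvReach adjL s p → q ∈ adjL p.1 → p.2 < q.2 → pvReach adjL s q

lemma pvReach_time {adjL : Int → List (Int × Int)} {s : Int} {p : Int × Int}
    (h : pvReach adjL s p) : -1 ≤ p.2 := by
  induction h with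
  | base => exact le_refl _
  | step h hq hlt ih => exact le_of_lt (lt_of_le_of_lt ih hlt)

-- ---- characterization of A's adjacency dict ----

def pvAdjStep (ts : List (Int × Int × Int)) (d : PySem.Dict Int (List (Int × Int)))
    (e : Int × Int) : PySem.Dict Int (List (Int × Int)) :=
  (d.modify e.1 [] (fun l => l ++ [(e.2, pvT ts e)])).modify e.2 [] (fun l => l ++ [(e.1, pvT ts e)])

lemma pvAdj_eq (ts : List (Int × Int × Int)) (es : List (Int × Int)) :
    pvAdj ts es = es.foldl (pvAdjStep ts) PySem.Dict.empty := rfl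

def pvEnt (ts : List (Int × Int × Int)) (v : Int) (e : Int × Int) : List (Int × Int) :=
  (if e.1 = v then [(e.2, pvT ts e)] else []) ++ (if e.2 = v then [(e.1, pvT ts e)] else [])

lemma pvAdjStep_getD (ts : List (Int × Int × Int)) (d : PySem.Dict Int (List (Int × Int)))
    (e : Int × Int) (v : Int) :
    (pvAdjStep ts d e).getD v [] = d.getD v [] ++ pvEnt ts v e := by
  unfold pvAdjStep pvEnt
  simp only [PySem.Dict.getD_modify]
  by_cases h2 : v = e.2 <;> by_cases h1 : v = e.1 <;> simp_all [List.append_assoc] <;> omega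

lemma mem_pvAdj (ts : List (Int × Int × Int)) (es : List (Int × Int)) (v : Int) (q : Int × Int) :
    q ∈ (pvAdj ts es).getD v [] ↔
      ∃ e ∈ es, (e.1 = v ∧ q = (e.2, pvT ts e)) ∨ (e.2 = v ∧ q = (e.1, pvT ts e)) := by
  have haux : ∀ (l : List (Int × Int)) (d : PySem.Dict Int (List (Int × Int))),
      (l.foldl (pvAdjStep ts) d).getD v [] = d.getD v [] ++ l.flatMap (pvEnt ts v) := by
    intro l
    induction l with
    | nil => intro d; simp
    | cons e l ih =>
      intro d
      simp only [List.foldl_cons, ih, pvAdjStep_getD, List.flatMap_cons, List.append_assoc]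
  rw [pvAdj_eq, haux]
  simp only [PySem.Dict.getD_empty, List.nil_append, List.mem_flatMap, pvEnt,
    List.mem_append, List.mem_ite_nil_right, List.mem_singleton]

-- ---- characterization of B's usable-edge list ----

lemma pvEdges_mem (ts : List (Int × Int × Int)) (es : List (Int × Int)) (x : Int × Int × Int) :
    x ∈ pvEdges ts es ↔ ∃ e ∈ es, -1 < pvT ts e ∧ x = (pvT ts e, e.1, e.2) := by
  have haux : ∀ (l : List (Int × Int)) (acc : List (Int × Int × Int)),
      x ∈ l.foldl (fun acc e =>
        let t := (pvTsGet? ts (pvEkey e.1 e.2)).getD 0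
        if t > -1 then acc ++ [(t, e.1, e.2)] else acc) acc ↔
      x ∈ acc ∨ ∃ e ∈ l, -1 < pvT ts e ∧ x = (pvT ts e, e.1, e.2) := by
    intro l
    induction l with
    | nil => intro acc; simp
    | cons e l ih =>
      intro acc
      rw [List.foldl_cons, ih]
      by_cases h : (-1 : Int) < pvT ts e
      · have hred : (let t := (pvTsGet? ts (pvEkey e.1 e.2)).getD 0
            if t > -1 then acc ++ [(t, e.1, e.2)] else acc)
            = acc ++ [(pvT ts e, e.1, e.2)] := by exact if_pos h
        rw [hred]
        simp only [List.mem_append, List.mem_singleton, List.mem_cons]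
        constructor
        · rintro ((ha | (ha | ha)) | ⟨e', he', h1, h2⟩)
          · exact Or.inl ha
          · exact Or.inr ⟨e, Or.inl rfl, h, ha⟩
          · exact absurd ha (List.not_mem_nil)
          · exact Or.inr ⟨e', Or.inr he', h1, h2⟩
        · rintro (ha | ⟨e', he' | he', h1, h2⟩)
          · exact Or.inl (Or.inl ha)
          · subst he'; exact Or.inl (Or.inr (Or.inl h2))
          · exact Or.inr ⟨e', he', h1, h2⟩
      · have hred : (let t := (pvTsGet? ts (pvEkey e.1 e.2)).getD 0
            if t > -1 then acc ++ [(t, e.1, e.2)] else acc) = acc := by exact if_neg h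
        rw [hred]
        simp only [List.mem_cons]
        constructor
        · rintro (ha | ⟨e', he', h1, h2⟩)
          · exact Or.inl ha
          · exact Or.inr ⟨e', Or.inr he', h1, h2⟩
        · rintro (ha | ⟨e', he' | he', h1, h2⟩)
          · exact Or.inl ha
          · subst he'; exact absurd h1 h
          · exact Or.inr ⟨e', he', h1, h2⟩
  rw [show pvEdges ts es = es.foldl (fun acc e =>
        let t := (pvTsGet? ts (pvEkey e.1 e.2)).getD 0
        if t > -1 then acc ++ [(t, e.1, e.2)] else acc) [] from rfl, haux]
  simp

-- ---- bridge between A's adjacency entries and B's usable edges (for times above -1) ----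

lemma pvBridge (ts : List (Int × Int × Int)) (es : List (Int × Int)) (v : Int) (q : Int × Int)
    (hq : -1 < q.2) :
    q ∈ (pvAdj ts es).getD v [] ↔
      ∃ x ∈ pvEdges ts es, x.1 = q.2 ∧
        ((x.2.1 = v ∧ x.2.2 = q.1) ∨ (x.2.2 = v ∧ x.2.1 = q.1)) := by
  rw [mem_pvAdj]
  constructor
  · rintro ⟨e, he, hcase⟩
    refine ⟨(pvT ts e, e.1, e.2), ?_, ?_, ?_⟩
    · rw [pvEdges_mem]
      exact ⟨e, he, by rcases hcase with ⟨_, rfl⟩ | ⟨_, rfl⟩ <;> simpa using hq, rfl⟩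
    · rcases hcase with ⟨_, rfl⟩ | ⟨_, rfl⟩ <;> rfl
    · rcases hcase with ⟨h, rfl⟩ | ⟨h, rfl⟩
      · exact Or.inl ⟨h, rfl⟩
      · exact Or.inr ⟨h, rfl⟩
  · rintro ⟨x, hx, h1, hor⟩
    rw [pvEdges_mem] at hx
    obtain ⟨e, he, hpos, rfl⟩ := hx
    refine ⟨e, he, ?_⟩
    rcases hor with ⟨ha, hb⟩ | ⟨ha, hb⟩
    · exact Or.inl ⟨ha, by obtain ⟨q1, q2⟩ := q; simp_all⟩
    · exact Or.inr ⟨ha, by obtain ⟨q1, q2⟩ := q; simp_all⟩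

-- ---- A side: correctness of the BFS loop ----

def pvIStep (lt : Int) (st : List (Int × Int) × PySem.Set (Int × Int) × PySem.Set Int)
    (q : Int × Int) : List (Int × Int) × PySem.Set (Int × Int) × PySem.Set Int :=
  if lt < q.2 ∧ q ∉ st.2.1 then
    (st.1 ++ [q], PySem.Set.add st.2.1 q, PySem.Set.add st.2.2 q.1)
  else st

lemma pvInner_eq (adj : PySem.Dict Int (List (Int × Int))) (p : Int × Int)
    (st : List (Int × Int) × PySem.Set (Int × Int) × PySem.Set Int) :
    pvInner adj p st = (adj.getD p.1 []).foldl (pvIStep p.2) st := rfl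

lemma pvInnerFold_spec (lt : Int) (V0 : List (Int × Int)) (R0 : List Int) :
    ∀ (l : List (Int × Int)) (st : List (Int × Int) × PySem.Set (Int × Int) × PySem.Set Int),
    st.2.1 = V0 ++ st.1 → st.2.1.Nodup → st.2.2.Nodup →
    (∀ w, w ∈ st.2.2 ↔ w ∈ R0 ∨ ∃ t, (w, t) ∈ st.1) →
    (l.foldl (pvIStep lt) st).2.1 = V0 ++ (l.foldl (pvIStep lt) st).1 ∧
    (l.foldl (pvIStep lt) st).2.1.Nodup ∧
    (l.foldl (pvIStep lt) st).2.2.Nodup ∧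
    (∀ w, w ∈ (l.foldl (pvIStep lt) st).2.2 ↔
        w ∈ R0 ∨ ∃ t, (w, t) ∈ (l.foldl (pvIStep lt) st).1) ∧
    (∀ q ∈ (l.foldl (pvIStep lt) st).1, q ∈ st.1 ∨ (q ∈ l ∧ lt < q.2)) ∧
    (∀ q ∈ l, lt < q.2 → q ∈ (l.foldl (pvIStep lt) st).2.1) ∧
    (∀ q ∈ st.1, q ∈ (l.foldl (pvIStep lt) st).1) ∧
    (∀ p ∈ st.2.1, p ∈ (l.foldl (pvIStep lt) st).2.1) := by
  intro l
  induction l with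
  | nil =>
    intro st h1 h2 h3 h4
    exact ⟨h1, h2, h3, h4, fun q hq => Or.inl hq, by simp, fun q hq => hq, fun p hp => hp⟩
  | cons q l ih =>
    intro st h1 h2 h3 h4
    rw [List.foldl_cons]
    by_cases hc : lt < q.2 ∧ q ∉ st.2.1
    · have hstep : pvIStep lt st q
          = (st.1 ++ [q], st.2.1 ++ [q], PySem.Set.add st.2.2 q.1) := by
        unfold pvIStep
        rw [if_pos hc, PySem.Set.add_of_not_mem hc.2]
      rw [hstep]
      obtain ⟨h1', h2', h3', h4', h5', h6', h7', h8'⟩ :=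
        ih (st.1 ++ [q], st.2.1 ++ [q], PySem.Set.add st.2.2 q.1)
          (by simp [h1, List.append_assoc])
          (by
            simp [List.nodup_append, h2]
            intro a b hab heq
            exact hc.2 (heq ▸ hab))
          (PySem.Set.nodup_add _ _ h3)
          (by
            intro w
            show w ∈ PySem.Set.add st.2.2 q.1 ↔ _
            rw [PySem.Set.mem_add]
            constructor
            · rintro (hw | rfl)
              · rcases (h4 w).1 hw with h | ⟨t, ht⟩
                · exact Or.inl h
                · exact Or.inr ⟨t, List.mem_append_left _ ht⟩
              · exact Or.inr ⟨q.2, List.mem_append_right _ (by simp)⟩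
            · rintro (h | ⟨t, ht⟩)
              · exact Or.inl ((h4 w).2 (Or.inl h))
              · rcases List.mem_append.1 ht with ht | ht
                · exact Or.inl ((h4 w).2 (Or.inr ⟨t, ht⟩))
                · exact Or.inr (congrArg Prod.fst (List.mem_singleton.1 ht)))
      refine ⟨h1', h2', h3', h4', ?_, ?_, ?_, ?_⟩
      · intro q' hq'
        rcases h5' q' hq' with hq' | ⟨hql, hqt⟩
        · rcases List.mem_append.1 hq' with hq' | hq'
          · exact Or.inl hq'
          · rw [List.mem_singleton] at hq'
            subst hq'
            exact Or.inr ⟨List.mem_cons_self, hc.1⟩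
        · exact Or.inr ⟨List.mem_cons_of_mem _ hql, hqt⟩
      · intro q' hq' hqt
        rcases List.mem_cons.1 hq' with rfl | hq'
        · exact h8' q' (List.mem_append_right _ (by simp))
        · exact h6' q' hq' hqt
      · intro q' hq'
        exact h7' q' (List.mem_append_left _ hq')
      · intro p hp
        exact h8' p (List.mem_append_left _ hp)
    · have hstep : pvIStep lt st q = st := by
        unfold pvIStep; rw [if_neg hc]
      rw [hstep]
      obtain ⟨h1', h2', h3', h4', h5', h6', h7', h8'⟩ := ih st h1 h2 h3 h4
      refine ⟨h1', h2', h3', h4', ?_, ?_, h7', h8'⟩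
      · intro q' hq'
        rcases h5' q' hq' with hq' | ⟨hql, hqt⟩
        · exact Or.inl hq'
        · exact Or.inr ⟨List.mem_cons_of_mem _ hql, hqt⟩
      · intro q' hq' hqt
        rcases List.mem_cons.1 hq' with rfl | hq'
        · have hqin : q' ∈ st.2.1 := by
            by_contra hno
            exact hc ⟨hqt, hno⟩
          exact h8' q' hqin
        · exact h6' q' hq' hqt

lemma pvOuterFold_spec (adj : PySem.Dict Int (List (Int × Int)))
    (V0 : List (Int × Int)) (R0 : List Int) :
    ∀ (f : List (Int × Int)) (st : List (Int × Int) × PySem.Set (Int × Int) × PySem.Set Int),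
    st.2.1 = V0 ++ st.1 → st.2.1.Nodup → st.2.2.Nodup →
    (∀ w, w ∈ st.2.2 ↔ w ∈ R0 ∨ ∃ t, (w, t) ∈ st.1) →
    (f.foldl (fun st p => pvInner adj p st) st).2.1
        = V0 ++ (f.foldl (fun st p => pvInner adj p st) st).1 ∧
    (f.foldl (fun st p => pvInner adj p st) st).2.1.Nodup ∧
    (f.foldl (fun st p => pvInner adj p st) st).2.2.Nodup ∧
    (∀ w, w ∈ (f.foldl (fun st p => pvInner adj p st) st).2.2 ↔
        w ∈ R0 ∨ ∃ t, (w, t) ∈ (f.foldl (fun st p => pvInner adj p st) st).1) ∧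
    (∀ q ∈ (f.foldl (fun st p => pvInner adj p st) st).1,
        q ∈ st.1 ∨ ∃ p ∈ f, q ∈ adj.getD p.1 [] ∧ p.2 < q.2) ∧
    (∀ p ∈ f, ∀ q ∈ adj.getD p.1 [], p.2 < q.2 →
        q ∈ (f.foldl (fun st p => pvInner adj p st) st).2.1) ∧
    (∀ q ∈ st.1, q ∈ (f.foldl (fun st p => pvInner adj p st) st).1) ∧
    (∀ p ∈ st.2.1, p ∈ (f.foldl (fun st p => pvInner adj p st) st).2.1) := by
  intro f
  induction f with
  | nil =>
    intro st h1 h2 h3 h4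
    refine ⟨h1, h2, h3, h4, fun q hq => Or.inl hq, by simp, fun q hq => hq, fun p hp => hp⟩
  | cons p f ih =>
    intro st h1 h2 h3 h4
    rw [List.foldl_cons]
    rw [pvInner_eq]
    obtain ⟨i1, i2, i3, i4, i5, i6, i7, i8⟩ :=
      pvInnerFold_spec p.2 V0 R0 (adj.getD p.1 []) st h1 h2 h3 h4
    obtain ⟨o1, o2, o3, o4, o5, o6, o7, o8⟩ :=
      ih ((adj.getD p.1 []).foldl (pvIStep p.2) st) i1 i2 i3 i4
    refine ⟨o1, o2, o3, o4, ?_, ?_, ?_, ?_⟩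
    · intro q hq
      rcases o5 q hq with hq | ⟨p', hp', hq1, hq2⟩
      · rcases i5 q hq with hq | ⟨hql, hqt⟩
        · exact Or.inl hq
        · exact Or.inr ⟨p, List.mem_cons_self, hql, hqt⟩
      · exact Or.inr ⟨p', List.mem_cons_of_mem _ hp', hq1, hq2⟩
    · intro p' hp' q hq hqt
      rcases List.mem_cons.1 hp' with rfl | hp'
      · exact o8 q (i6 q hq hqt)
      · exact o6 p' hp' q hq hqt
    · intro q hq
      exact o7 q (i7 q hq)
    · intro p' hp'
      exact o8 p' (i8 p' hp')

lemma pvClosed_iff (adj : PySem.Dict Int (List (Int × Int))) (s : Int)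
    (V : List (Int × Int)) (R : List Int)
    (hbase : ((s : Int), (-1 : Int)) ∈ V)
    (hsound : ∀ p ∈ V, pvReach (pvAdjL adj) s p)
    (hclosed : ∀ p ∈ V, ∀ q ∈ adj.getD p.1 [], p.2 < q.2 → q ∈ V)
    (hR : ∀ w, w ∈ R ↔ ∃ t, (w, t) ∈ V) :
    ∀ w, w ∈ R ↔ ∃ t, pvReach (pvAdjL adj) s (w, t) := by
  have hcomp : ∀ p, pvReach (pvAdjL adj) s p → p ∈ V := by
    intro p h
    induction h with
    | base => exact hbase
    | step h hq hlt ih => exact hclosed _ ih _ hq hlt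
  intro w
  rw [hR w]
  constructor
  · rintro ⟨t, ht⟩; exact ⟨t, hsound _ ht⟩
  · rintro ⟨t, ht⟩; exact ⟨t, hcomp _ ht⟩

lemma pvBfs_spec (adj : PySem.Dict Int (List (Int × Int))) (s : Int)
    (pairs : List (Int × Int))
    (hpairs : ∀ v : Int, ∀ q ∈ adj.getD v [], q ∈ pairs) :
    ∀ (fuel : Nat) (f : List (Int × Int)) (V : PySem.Set (Int × Int)) (R : PySem.Set Int),
    (∀ p ∈ f, p ∈ V) → (((s : Int), (-1 : Int)) ∈ V) → V.Nodup → R.Nodup →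
    (∀ p ∈ V, pvReach (pvAdjL adj) s p) →
    (∀ p ∈ V, p ∉ f → ∀ q ∈ adj.getD p.1 [], p.2 < q.2 → q ∈ V) →
    (∀ w, w ∈ R ↔ ∃ t, (w, t) ∈ V) →
    (∀ p ∈ V, p = (s, -1) ∨ p ∈ pairs) →
    (pairs.length + 2 ≤ fuel + V.length) →
    (pvBfs adj fuel f V R).Nodup ∧
      ∀ w, w ∈ pvBfs adj fuel f V R ↔ ∃ t, pvReach (pvAdjL adj) s (w, t) := by
  intro fuel
  induction fuel with
  | zero =>
    intro f V R hfV hbase hVnd hRnd hsound hclosed hR hVU hfuel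
    exfalso
    have h1 : ∀ p ∈ V, p ∈ ((s : Int), (-1 : Int)) :: pairs := by
      intro p hp
      rcases hVU p hp with rfl | h
      · exact List.mem_cons_self
      · exact List.mem_cons_of_mem _ h
    have h2 : V.toFinset ⊆ (((s : Int), (-1 : Int)) :: pairs).toFinset := by
      intro p hp
      rw [List.mem_toFinset] at *
      exact h1 _ hp
    have h3 := Finset.card_le_card h2
    have h4 := List.toFinset_card_le (((s : Int), (-1 : Int)) :: pairs)
    rw [List.toFinset_card_of_nodup hVnd] at h3
    simp only [List.length_cons] at h4
    omega
  | succ fuel ih =>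
    intro f V R hfV hbase hVnd hRnd hsound hclosed hR hVU hfuel
    by_cases hf : f = []
    · subst hf
      have hres : pvBfs adj (fuel + 1) [] V R = R := by simp [pvBfs]
      rw [hres]
      refine ⟨hRnd, pvClosed_iff adj s V R hbase hsound ?_ hR⟩
      intro p hp q hq hlt
      exact hclosed p hp (by simp) q hq hlt
    · have hres : pvBfs adj (fuel + 1) f V R =
          pvBfs adj fuel
            (f.foldl (fun st p => pvInner adj p st) (([] : List (Int × Int)), V, R)).1
            (f.foldl (fun st p => pvInner adj p st) (([] : List (Int × Int)), V, R)).2.1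
            (f.foldl (fun st p => pvInner adj p st) (([] : List (Int × Int)), V, R)).2.2 := by
        simp [pvBfs, hf]
      rw [hres]
      obtain ⟨o1, o2, o3, o4, o5, o6, o7, o8⟩ :=
        pvOuterFold_spec adj V R f (([] : List (Int × Int)), V, R)
          (by simp) hVnd hRnd (by intro w; simp)
      set st := f.foldl (fun st p => pvInner adj p st) (([] : List (Int × Int)), V, R) with hst
      -- new invariants
      have nfV : ∀ p ∈ st.1, p ∈ st.2.1 := by
        intro p hp; rw [o1]; exact List.mem_append_right _ hp
      have nbase : ((s : Int), (-1 : Int)) ∈ st.2.1 := o8 _ hbase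
      have nsound : ∀ p ∈ st.2.1, pvReach (pvAdjL adj) s p := by
        intro p hp
        rw [o1] at hp
        rcases List.mem_append.1 hp with hp | hp
        · exact hsound p hp
        · rcases o5 p hp with hp | ⟨p', hp', hq, hlt⟩
          · simp at hp
          · exact pvReach.step (hsound p' (hfV p' hp')) hq hlt
      have nclosed : ∀ p ∈ st.2.1, p ∉ st.1 →
          ∀ q ∈ adj.getD p.1 [], p.2 < q.2 → q ∈ st.2.1 := by
        intro p hp hpn q hq hlt
        rw [o1] at hp
        rcases List.mem_append.1 hp with hp | hp
        · by_cases hpf : p ∈ f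
          · exact o6 p hpf q hq hlt
          · exact o8 q (hclosed p hp hpf q hq hlt)
        · exact absurd hp hpn
      have nR : ∀ w, w ∈ st.2.2 ↔ ∃ t, (w, t) ∈ st.2.1 := by
        intro w
        rw [o4 w, hR w, o1]
        constructor
        · rintro (⟨t, ht⟩ | ⟨t, ht⟩)
          · exact ⟨t, List.mem_append_left _ ht⟩
          · exact ⟨t, List.mem_append_right _ ht⟩
        · rintro ⟨t, ht⟩
          rcases List.mem_append.1 ht with ht | ht
          · exact Or.inl ⟨t, ht⟩
          · exact Or.inr ⟨t, ht⟩
      have nVU : ∀ p ∈ st.2.1, p = (s, -1) ∨ p ∈ pairs := by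
        intro p hp
        rw [o1] at hp
        rcases List.mem_append.1 hp with hp | hp
        · exact hVU p hp
        · rcases o5 p hp with hp | ⟨p', _, hq, _⟩
          · simp at hp
          · exact Or.inr (hpairs p'.1 p hq)
      by_cases hf' : st.1 = []
      · have hres2 : pvBfs adj fuel st.1 st.2.1 st.2.2 = st.2.2 := by
          rw [hf']
          cases fuel <;> simp [pvBfs]
        rw [hres2]
        refine ⟨o3, pvClosed_iff adj s st.2.1 st.2.2 nbase nsound ?_ nR⟩
        intro p hp q hq hlt
        exact nclosed p hp (by rw [hf']; simp) q hq hlt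
      · have hlen : 0 < st.1.length := List.length_pos_of_ne_nil hf'
        have hVlen : st.2.1.length = V.length + st.1.length := by
          rw [o1, List.length_append]
        exact ih st.1 st.2.1 st.2.2 nfV nbase o2 o3 nsound nclosed nR nVU (by omega)

-- ---- B side: correctness of the chronological sweep ----

def pvBStep (tm : Int) (snap : PySem.Set Int) (r : PySem.Set Int) (e : Int × Int × Int) :
    PySem.Set Int :=
  if e.1 = tm then
    let r1 := if e.2.1 ∈ snap then PySem.Set.add r e.2.2 else r
    if e.2.2 ∈ snap then PySem.Set.add r1 e.2.1 else r1
  else r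

lemma pvSweepOne_eq (edges : List (Int × Int × Int)) (times : List Int) (s : Int) :
    pvSweepOne edges times s
      = times.foldl (fun reach tm => edges.foldl (pvBStep tm reach) reach) [s] := rfl

lemma pvBatch_spec (tm : Int) (snap : PySem.Set Int) :
    ∀ (E : List (Int × Int × Int)) (r : PySem.Set Int), r.Nodup →
    (E.foldl (pvBStep tm snap) r).Nodup ∧
    (∀ w, w ∈ E.foldl (pvBStep tm snap) r ↔
       w ∈ r ∨ ∃ x ∈ E, x.1 = tm ∧
         ((x.2.1 ∈ snap ∧ w = x.2.2) ∨ (x.2.2 ∈ snap ∧ w = x.2.1))) := by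
  intro E
  induction E with
  | nil => intro r hr; exact ⟨hr, by simp⟩
  | cons x E ih =>
    intro r hr
    rw [List.foldl_cons]
    have hnd1 : (pvBStep tm snap r x).Nodup := by
      unfold pvBStep
      split_ifs <;>
        first
          | exact hr
          | exact PySem.Set.nodup_add _ _ hr
          | exact PySem.Set.nodup_add _ _ (PySem.Set.nodup_add _ _ hr)
    have hmem1 : ∀ w, w ∈ pvBStep tm snap r x ↔
        w ∈ r ∨ (x.1 = tm ∧ ((x.2.1 ∈ snap ∧ w = x.2.2) ∨ (x.2.2 ∈ snap ∧ w = x.2.1))) := by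
      intro w
      unfold pvBStep
      split_ifs with h1 h2 h3 h4 h5 <;>
        simp [PySem.Set.mem_add, *] <;> tauto
    obtain ⟨hnd2, hmem2⟩ := ih (pvBStep tm snap r x) hnd1
    refine ⟨hnd2, ?_⟩
    intro w
    rw [hmem2 w, hmem1 w]
    constructor
    · rintro ((hw | h) | ⟨x', hx', h⟩)
      · exact Or.inl hw
      · exact Or.inr ⟨x, List.mem_cons_self, h⟩
      · exact Or.inr ⟨x', List.mem_cons_of_mem _ hx', h⟩
    · rintro (hw | ⟨x', hx', h⟩)
      · exact Or.inl (Or.inl hw)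
      · rcases List.mem_cons.1 hx' with rfl | hx'
        · exact Or.inl (Or.inr h)
        · exact Or.inr ⟨x', hx', h⟩

lemma pvSweep_spec (ts : List (Int × Int × Int)) (es : List (Int × Int)) (s : Int) :
    ∀ (L : List Int) (r : PySem.Set Int),
    L.Pairwise (· < ·) →
    (∀ t' ∈ L, (-1 : Int) < t') →
    (∀ x ∈ pvEdges ts es, x.1 ∈ L ∨ ∀ t' ∈ L, x.1 < t') →
    r.Nodup →
    (∀ w, w ∈ r ↔ ∃ t, pvReach (pvAdjL (pvAdj ts es)) s (w, t) ∧ ∀ t' ∈ L, t < t') →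
    (L.foldl (fun reach tm => (pvEdges ts es).foldl (pvBStep tm reach) reach) r).Nodup ∧
    (∀ w, w ∈ L.foldl (fun reach tm => (pvEdges ts es).foldl (pvBStep tm reach) reach) r ↔
       ∃ t, pvReach (pvAdjL (pvAdj ts es)) s (w, t)) := by
  intro L
  induction L with
  | nil =>
    intro r _ _ _ hrnd hr
    refine ⟨hrnd, ?_⟩
    intro w
    simpa using hr w
  | cons tm L' ih =>
    intro r hpw hneg hcov hrnd hr
    rw [List.foldl_cons]
    have htm : (-1 : Int) < tm := hneg tm List.mem_cons_self
    have htmL' : ∀ t' ∈ L', tm < t' := (List.pairwise_cons.1 hpw).1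
    obtain ⟨bnd, bmem⟩ := pvBatch_spec tm r (pvEdges ts es) r hrnd
    have hr' : ∀ w, w ∈ (pvEdges ts es).foldl (pvBStep tm r) r ↔
        ∃ t, pvReach (pvAdjL (pvAdj ts es)) s (w, t) ∧ ∀ t' ∈ L', t < t' := by
      intro w
      rw [bmem w]
      constructor
      · rintro (hw | ⟨x, hx, hxt, hor⟩)
        · obtain ⟨t, hreach, hbd⟩ := (hr w).1 hw
          exact ⟨t, hreach, fun t' ht' => hbd t' (List.mem_cons_of_mem _ ht')⟩
        · rcases hor with ⟨hv, rfl⟩ | ⟨hv, rfl⟩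
          · obtain ⟨t0, hst0, hbd⟩ := (hr x.2.1).1 hv
            have ht0 : t0 < tm := hbd tm List.mem_cons_self
            have hadj : (x.2.2, tm) ∈ (pvAdj ts es).getD x.2.1 [] := by
              rw [pvBridge ts es x.2.1 (x.2.2, tm) htm]
              exact ⟨x, hx, hxt, Or.inl ⟨rfl, rfl⟩⟩
            exact ⟨tm, pvReach.step hst0 hadj ht0, htmL'⟩
          · obtain ⟨t0, hst0, hbd⟩ := (hr x.2.2).1 hv
            have ht0 : t0 < tm := hbd tm List.mem_cons_self
            have hadj : (x.2.1, tm) ∈ (pvAdj ts es).getD x.2.2 [] := by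
              rw [pvBridge ts es x.2.2 (x.2.1, tm) htm]
              exact ⟨x, hx, hxt, Or.inr ⟨rfl, rfl⟩⟩
            exact ⟨tm, pvReach.step hst0 hadj ht0, htmL'⟩
      · rintro ⟨t, hst, hbd'⟩
        rcases lt_trichotomy t tm with hlt | rfl | hgt
        · refine Or.inl ((hr w).2 ⟨t, hst, ?_⟩)
          intro t' ht'
          rcases List.mem_cons.1 ht' with rfl | ht'
          · exact hlt
          · exact hbd' t' ht'
        · cases hst with
          | base => exact absurd htm (by omega)
          | step h hq hlt =>
            rename_i p
            have hpr : p.1 ∈ r := by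
              refine (hr p.1).2 ⟨p.2, h, ?_⟩
              intro t' ht'
              rcases List.mem_cons.1 ht' with rfl | ht'
              · exact hlt
              · exact lt_trans hlt (htmL' t' ht')
            rw [pvAdjL_apply] at hq
            rw [pvBridge ts es p.1 (w, t) htm] at hq
            obtain ⟨x, hx, hx1, hor⟩ := hq
            refine Or.inr ⟨x, hx, hx1, ?_⟩
            rcases hor with ⟨ha, hb⟩ | ⟨ha, hb⟩
            · exact Or.inl ⟨by rw [ha]; exact hpr, hb.symm⟩
            · exact Or.inr ⟨by rw [ha]; exact hpr, hb.symm⟩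
        · exfalso
          have htpos : (-1 : Int) < t := lt_trans htm hgt
          cases hst with
          | base => exact absurd htpos (by omega)
          | step h hq hlt =>
            rename_i p
            rw [pvAdjL_apply] at hq
            rw [pvBridge ts es p.1 (w, t) htpos] at hq
            obtain ⟨x, hx, hx1, _⟩ := hq
            rcases hcov x hx with hx' | hx'
            · rcases List.mem_cons.1 hx' with hx'' | hx''
              · omega
              · have := hbd' x.1 hx''
                omega
            · have := hx' tm List.mem_cons_self
              omega
    have hcov' : ∀ x ∈ pvEdges ts es, x.1 ∈ L' ∨ ∀ t' ∈ L', x.1 < t' := by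
      intro x hx
      rcases hcov x hx with hx' | hx'
      · rcases List.mem_cons.1 hx' with hx'' | hx''
        · refine Or.inr ?_
          intro t' ht'
          rw [hx'']
          exact htmL' t' ht'
        · exact Or.inl hx''
      · exact Or.inr fun t' ht' => hx' t' (List.mem_cons_of_mem _ ht')
    exact ih ((pvEdges ts es).foldl (pvBStep tm r) r)
      (List.pairwise_cons.1 hpw).2
      (fun t' ht' => hneg t' (List.mem_cons_of_mem _ ht'))
      hcov' bnd hr'

-- ---- per-source agreement, then the whole loop ----

lemma pvPairs_length (ts : List (Int × Int × Int)) (es : List (Int × Int)) :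
    (es.flatMap (fun e => [(e.2, pvT ts e), (e.1, pvT ts e)])).length = 2 * es.length := by
  induction es with
  | nil => simp
  | cons e es ih => simp [ih]; omega

lemma pvSource_eq (ts : List (Int × Int × Int)) (es : List (Int × Int)) (s : Int) :
    (pvBfs (pvAdj ts es) (2 * es.length + 3) [(s, -1)] [(s, -1)] [s]).length
      = (pvSweepOne (pvEdges ts es) (pvTimes ts es) s).length := by
  have hpairs : ∀ v : Int, ∀ q ∈ (pvAdj ts es).getD v [],
      q ∈ es.flatMap (fun e => [(e.2, pvT ts e), (e.1, pvT ts e)]) := by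
    intro v q hq
    rw [mem_pvAdj] at hq
    obtain ⟨e, he, hcase⟩ := hq
    rw [List.mem_flatMap]
    refine ⟨e, he, ?_⟩
    rcases hcase with ⟨_, rfl⟩ | ⟨_, rfl⟩ <;> simp
  obtain ⟨hnd1, hmem1⟩ := pvBfs_spec (pvAdj ts es) s
    (es.flatMap (fun e => [(e.2, pvT ts e), (e.1, pvT ts e)])) hpairs
    (2 * es.length + 3) [(s, -1)] [(s, -1)] [s]
    (by simp)
    (by simp)
    (by simp)
    (by simp)
    (by
      intro p hp
      rw [List.mem_singleton] at hp
      subst hp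
      exact pvReach.base)
    (by
      intro p hp hpn
      rw [List.mem_singleton] at hp
      exact absurd (List.mem_singleton.2 hp) hpn)
    (by
      intro w
      simp [Prod.ext_iff])
    (by
      intro p hp
      rw [List.mem_singleton] at hp
      exact Or.inl hp)
    (by rw [pvPairs_length]; omega)
  have hneg : ∀ t' ∈ pvTimes ts es, (-1 : Int) < t' := by
    intro t' ht'
    unfold pvTimes at ht'
    rw [PySem.List.mem_sorted, PySem.Set.mem_ofList, List.mem_map] at ht'
    obtain ⟨x, hx, rfl⟩ := ht'
    rw [pvEdges_mem] at hx
    obtain ⟨e, _, hpos, rfl⟩ := hx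
    exact hpos
  have hcov : ∀ x ∈ pvEdges ts es, x.1 ∈ pvTimes ts es ∨ ∀ t' ∈ pvTimes ts es, x.1 < t' := by
    intro x hx
    refine Or.inl ?_
    unfold pvTimes
    rw [PySem.List.mem_sorted, PySem.Set.mem_ofList, List.mem_map]
    exact ⟨x, hx, rfl⟩
  have hsorted : (pvTimes ts es).Pairwise (· < ·) := by
    unfold pvTimes
    exact PySem.List.sorted_ofList_pairwise_lt _
  have hr0 : ∀ w, w ∈ ([s] : PySem.Set Int) ↔
      ∃ t, pvReach (pvAdjL (pvAdj ts es)) s (w, t) ∧ ∀ t' ∈ pvTimes ts es, t < t' := by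
    intro w
    rw [List.mem_singleton]
    constructor
    · rintro rfl
      exact ⟨-1, pvReach.base, fun t' ht' => hneg t' ht'⟩
    · rintro ⟨t, hst, hbd⟩
      cases hst with
      | base => rfl
      | step h hq hlt =>
        exfalso
        rename_i p
        have hppos : (-1 : Int) ≤ p.2 := pvReach_time h
        have htpos : (-1 : Int) < t := lt_of_le_of_lt hppos hlt
        rw [pvAdjL_apply] at hq
        rw [pvBridge ts es p.1 (w, t) htpos] at hq
        obtain ⟨x, hx, hx1, _⟩ := hq
        have hmem : x.1 ∈ pvTimes ts es := by
          unfold pvTimes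
          rw [PySem.List.mem_sorted, PySem.Set.mem_ofList, List.mem_map]
          exact ⟨x, hx, rfl⟩
        have := hbd x.1 hmem
        omega
  obtain ⟨hnd2, hmem2⟩ := pvSweep_spec ts es s (pvTimes ts es) [s]
    hsorted hneg hcov (by simp) hr0
  rw [pvSweepOne_eq]
  exact (List.Perm.length_eq
    ((List.perm_ext_iff_of_nodup hnd1 hnd2).2 (fun w => (hmem1 w).trans ((hmem2 w).symm))))

lemma pvAll_eq (ts : List (Int × Int × Int)) (es : List (Int × Int)) (n : Int) :
    ∀ (srcs : List Int),
    pvCheck (pvAdj ts es) n (2 * es.length + 3) srcs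
      = pvSweepAll (pvEdges ts es) (pvTimes ts es) n srcs := by
  intro srcs
  induction srcs with
  | nil => rfl
  | cons s rest ih =>
    show (if ((pvBfs (pvAdj ts es) (2 * es.length + 3) [(s, -1)] [(s, -1)] [s]).length : Int) < n
          then some false
          else pvCheck (pvAdj ts es) n (2 * es.length + 3) rest) = _
    rw [pvSource_eq ts es s, ih]
    rfl

-- ===== VERDICT (by name: the statement is the Claim_ definition above) =====
theorem verify_temporal_spanner_spec : Claim_equal_verify_temporal_spanner := by
  intro n ts es _ _
  unfold Spec_verify_temporal_spanner verify_temporal_spanner verify_temporal_spanner_alt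
  by_cases h : n > 16
  · rw [if_pos h, if_pos h]
  · rw [if_neg h, if_neg h]
    exact pvAll_eq ts es n (PySem.List.pyRange 0 n 1)
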